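-- pv_equiv track=rewrite | github.com/marcop4/selic | selic_gui.py | validate_patterns
-- ===== SOURCE A (Python) =====
-- def validate_patterns(patterns):
--     """Valida los patrones ingresados. Retorna (ok, mensaje_error)."""
--     valid_markers = {"#", "%", "@", ",", "?"}
--     for i, pattern in enumerate(patterns, 1):
--         if not pattern:
--             continue
--         # Verificar que tenga al menos 1 marcador
--         has_marker = False
--         j = 0
--         while j < len(pattern):
--             ch = pattern[j]
--             if ch == "\\" and j + 1 < len(pattern):
--                 j += 2  # Saltar escape
--                 continue
--             if ch in valid_markers:
--                 has_marker = True
--                 break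
--             j += 1
--         if not has_marker:
--             return False, (f"Patrón #{i} '{pattern}' no tiene ningún marcador (#, %, @, ,, ?).\n"
--                            "Si quieres texto fijo, no necesitas un patrón.\n"
--                            "¿Quizás quisiste usar un marcador?")
--     return True, ""
-- ===== SOURCE B (Python) =====
-- def validate_patterns(patterns):
--     """Valida los patrones ingresados. Retorna (ok, mensaje_error)."""
--     markers = "#%@,?"
--
--     def bs_run(pattern, j):
--         # length of the backslash run ending just before index j
--         n = 0
--         while j > 0 and pattern[j - 1] == "\\":
--             n += 1
--             j -= 1
--         return n
--
--     for i, pattern in enumerate(patterns, 1):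
--         # a character counts as a marker iff the backslash run before it has even length
--         has_marker = any(ch in markers and bs_run(pattern, j) % 2 == 0
--                          for j, ch in enumerate(pattern))
--         if not has_marker and pattern:
--             return False, (f"Patrón #{i} '{pattern}' no tiene ningún marcador (#, %, @, ,, ?).\n"
--                            "Si quieres texto fijo, no necesitas un patrón.\n"
--                            "¿Quizás quisiste usar un marcador?")
--     return True, ""
-- ===== Notes on version B (the rewrite author's own statement) =====
-- stated objective: alternative
-- what changed: Replaces A's sequential escape-consuming scan (index walk that jumps over backslash pairs) by a declarative per-position test: a character is an effective marker iff it is a marker character and the backslash run immediately before it has even length; the escape state machine disappears.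
import Mathlib
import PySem

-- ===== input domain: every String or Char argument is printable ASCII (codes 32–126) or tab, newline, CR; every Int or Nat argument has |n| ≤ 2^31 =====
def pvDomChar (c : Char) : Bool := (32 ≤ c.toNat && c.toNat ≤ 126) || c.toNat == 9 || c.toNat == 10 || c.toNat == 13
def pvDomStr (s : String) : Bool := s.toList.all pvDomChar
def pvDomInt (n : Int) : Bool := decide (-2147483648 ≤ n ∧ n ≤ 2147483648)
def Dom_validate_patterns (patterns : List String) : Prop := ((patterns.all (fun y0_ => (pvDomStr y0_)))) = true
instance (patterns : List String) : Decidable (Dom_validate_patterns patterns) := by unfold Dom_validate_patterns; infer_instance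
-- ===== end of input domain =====

-- B replaces A's sequential escape-consuming scan by a per-position test: a character counts
-- as a marker iff the backslash run immediately before it has even length (objective: alternative).

-- shared: marker test and the error message (identical literal text in both Pythons)
def isMarker (c : Char) : Bool := c == '#' || c == '%' || c == '@' || c == ',' || c == '?'

def marker_msg (i : Int) (p : String) : String :=
  "Patrón #" ++ PySem.Int.toStr i ++ " '" ++ p ++
  "' no tiene ningún marcador (#, %, @, ,, ?).\nSi quieres texto fijo, no necesitas un patrón.\n¿Quizás quisiste usar un marcador?"

-- ===== PORT A =====
-- A's inner while loop: index j over the pattern's characters, skipping escape pairs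
def whileA (cs : List Char) (j : Nat) : Bool :=
  if h : j < cs.length then
    let ch := cs.getD j ' '
    if ch == '\\' && j + 1 < cs.length then whileA cs (j + 2)
    else if isMarker ch then true
    else whileA cs (j + 1)
  else false
termination_by cs.length - j
decreasing_by all_goals omega

-- A's outer for loop with enumerate(patterns, 1)
def loopA (patterns : List String) (i : Int) : Bool × String :=
  match patterns with
  | [] => (true, "")
  | p :: rest =>
    if p == "" then loopA rest (i + 1)
    else if whileA p.toList 0 then loopA rest (i + 1)
    else (false, marker_msg i p)

def validate_patterns (patterns : List String) : Bool × String := loopA patterns 1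

-- ===== PORT B =====
-- B's helper bs_run: the while loop counting the backslash run ending just before index j
def bsRun (cs : List Char) (j : Nat) (n : Nat) : Nat :=
  if 0 < j && cs.getD (j - 1) ' ' == '\\' then bsRun cs (j - 1) (n + 1) else n
termination_by j
decreasing_by simp_all

-- B's `any(ch in markers and bs_run(pattern, j) % 2 == 0 for j, ch in enumerate(pattern))`
def anyRecB (full : List Char) : List Char → Nat → Bool
  | [], _ => false
  | c :: rest, j => (isMarker c && bsRun full j 0 % 2 == 0) || anyRecB full rest (j + 1)

def loopB (patterns : List String) (i : Int) : Bool × String :=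
  match patterns with
  | [] => (true, "")
  | p :: rest =>
    let has_marker := anyRecB p.toList p.toList 0
    if !has_marker && !(p == "") then (false, marker_msg i p)
    else loopB rest (i + 1)

def validate_patterns_alt (patterns : List String) : Bool × String := loopB patterns 1

-- ===== PRECONDITION & SPEC =====
def Spec_validate_patterns (patterns : List String) (out : Bool × String) : Prop := out = validate_patterns_alt patterns
instance (patterns : List String) (out : Bool × String) : Decidable (Spec_validate_patterns patterns out) := by unfold Spec_validate_patterns; infer_instance

-- ===== CLAIM (what is proved, stated in full; the proofs are below) =====
def Claim_equal_validate_patterns : Prop := ∀ (patterns : List String), Dom_validate_patterns patterns → Spec_validate_patterns patterns (validate_patterns patterns)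

-- ===== LEMMAS AND PROOFS =====

-- proof-side reference: the list of characters not consumed as escape targets
def stripEsc : List Char → List Char
  | [] => []
  | c :: rest =>
    if c == '\\' then
      match rest with
      | [] => [c]
      | _ :: rest' => stripEsc rest'
    else c :: stripEsc rest

theorem stripEsc_cons (c : Char) (rest : List Char) (h : ¬ c = '\\') :
    stripEsc (c :: rest) = c :: stripEsc rest := by
  rw [stripEsc.eq_def]; simp [h]

-- A side: the escape-aware index scan from position j equals stripping escapes from the suffix
theorem whileA_eq (cs : List Char) (j : Nat) :
    whileA cs j = (stripEsc (cs.drop j)).any isMarker := by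
  rw [whileA]
  by_cases h : j < cs.length
  · have hd : cs.drop j = cs[j] :: cs.drop (j + 1) := List.drop_eq_getElem_cons h
    simp only [h, dif_pos, List.getD_eq_getElem _ _ h]
    by_cases hb : cs[j] = '\\'
    · by_cases h2 : j + 1 < cs.length
      · have hd2 : cs.drop (j + 1) = cs[j+1] :: cs.drop (j + 2) := List.drop_eq_getElem_cons h2
        rw [whileA_eq cs (j + 2), hd, hd2, hb]
        simp [h2, stripEsc]
      · have hd2 : cs.drop (j + 1) = [] := List.drop_eq_nil_of_le (by omega)
        rw [whileA_eq cs (j + 1), hd, hd2, hb]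
        simp [h2, stripEsc, isMarker]
    · by_cases hm : isMarker cs[j]
      · rw [hd, stripEsc_cons _ _ hb]; simp [hb, hm]
      · rw [whileA_eq cs (j + 1), hd, stripEsc_cons _ _ hb]; simp [hb, hm]
  · have hd : cs.drop j = [] := List.drop_eq_nil_of_le (by omega)
    simp [h, hd, stripEsc]
termination_by cs.length - j
decreasing_by all_goals omega

-- proof-side reference for the backslash run: recursion on the index
def bsSpec (cs : List Char) : Nat → Nat
  | 0 => 0
  | j + 1 => if cs[j]?.getD ' ' == '\\' then bsSpec cs j + 1 else 0

theorem bsRun_eq (cs : List Char) (j n : Nat) : bsRun cs j n = bsSpec cs j + n := by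
  induction j generalizing n with
  | zero => rw [bsRun]; simp [bsSpec]
  | succ j ih =>
    rw [bsRun]
    by_cases hb : cs[j]?.getD ' ' = '\\'
    · simp [hb, ih, bsSpec]; omega
    · simp [hb, bsSpec]

-- run shift under one cons (for positions inside the string)
theorem bsSpec_cons (a : Char) (cs : List Char) (j : Nat) (hj : j ≤ cs.length) :
    bsSpec (a :: cs) (j + 1) =
      bsSpec cs j + (if a = '\\' ∧ (cs.take j).all (· == '\\') then 1 else 0) := by
  induction j with
  | zero => by_cases ha : a = '\\' <;> simp [bsSpec, ha]
  | succ j ih =>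
    have hj' : j < cs.length := by omega
    have hget : (a :: cs)[j + 1]? = cs[j]? := by simp
    have e1 : bsSpec (a :: cs) (j + 1 + 1) =
        if ((a :: cs)[j + 1]?.getD ' ' == '\\') = true then bsSpec (a :: cs) (j + 1) + 1 else 0 := rfl
    have e2 : bsSpec cs (j + 1) =
        if (cs[j]?.getD ' ' == '\\') = true then bsSpec cs j + 1 else 0 := rfl
    rw [e1, e2, hget, ih (by omega)]
    by_cases hb : cs[j]?.getD ' ' = '\\'
    · have hcj : cs[j] = '\\' := by rwa [List.getElem?_eq_getElem hj', Option.getD_some] at hb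
      have htake : ((cs.take (j + 1)).all (· == '\\')) = ((cs.take j).all (· == '\\')) := by
        rw [List.take_succ_eq_append_getElem hj']; simp [hcj]
      have hbeq : (cs[j]?.getD ' ' == '\\') = true := by simp [hb]
      rw [htake, hbeq]
      simp; omega
    · have hcj : cs[j] ≠ '\\' := by
        rw [List.getElem?_eq_getElem hj'] at hb; simpa using hb
      have hall : ((cs.take (j + 1)).all (· == '\\')) = false := by
        rw [List.take_succ_eq_append_getElem hj', List.all_eq_false]
        exact ⟨cs[j], List.mem_append_right _ (List.mem_singleton_self _), by simp [hcj]⟩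
      have hbeq : (cs[j]?.getD ' ' == '\\') = false := by simp [hb]
      rw [hbeq]
      simp [hall]

theorem bsSpec_parity_cons (a : Char) (cs : List Char) (j : Nat) (hj : j ≤ cs.length)
    (ha : a ≠ '\\') : bsSpec (a :: cs) (j + 1) = bsSpec cs j := by
  rw [bsSpec_cons a cs j hj]; simp [ha]

theorem bsSpec_parity_two (c : Char) (rest : List Char) (j : Nat) (hj : j ≤ rest.length) :
    bsSpec ('\\' :: c :: rest) (j + 2) % 2 = bsSpec rest j % 2 := by
  have h1 := bsSpec_cons '\\' (c :: rest) (j + 1) (by simp; omega)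
  have h2 := bsSpec_cons c rest j hj
  have htake : (c :: rest).take (j + 1) = c :: rest.take j := rfl
  rw [show j + 2 = (j + 1) + 1 from rfl, h1, h2, htake]
  by_cases hc : c = '\\' <;> by_cases hr : ((rest.take j).all (· == '\\')) = true <;>
    simp [hc, hr] <;> omega

-- shifting anyRecB's full string by one non-backslash char / by an escape pair
theorem anyRecB_shift_one (a : Char) (cs l : List Char) (j : Nat)
    (hl : j + l.length ≤ cs.length + 1) (ha : a ≠ '\\') :
    anyRecB (a :: cs) l (j + 1) = anyRecB cs l j := by
  induction l generalizing j with
  | nil => rfl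
  | cons c rest ih =>
    simp only [anyRecB, bsRun_eq, Nat.add_zero]
    have hj : j ≤ cs.length := by simp at hl; omega
    rw [bsSpec_parity_cons a cs j hj ha, ih (j + 1) (by simp at hl ⊢; omega)]

theorem anyRecB_shift_two (c : Char) (cs l : List Char) (j : Nat)
    (hl : j + l.length ≤ cs.length + 1) :
    anyRecB ('\\' :: c :: cs) l (j + 2) = anyRecB cs l j := by
  induction l generalizing j with
  | nil => rfl
  | cons d rest ih =>
    simp only [anyRecB, bsRun_eq, Nat.add_zero]
    have hj : j ≤ cs.length := by simp at hl; omega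
    rw [bsSpec_parity_two c cs j hj, ih (j + 1) (by simp at hl ⊢; omega)]

-- B's per-position test equals the strip-escapes reference
theorem anyRecB_eq (cs : List Char) : anyRecB cs cs 0 = (stripEsc cs).any isMarker := by
  match cs with
  | [] => rfl
  | c :: rest =>
    by_cases hc : c = '\\'
    · subst hc
      match rest with
      | [] => simp [anyRecB, isMarker, stripEsc]
      | d :: rest' =>
        have ihr := anyRecB_eq rest'
        have h2 : anyRecB ('\\' :: d :: rest') rest' 2 = anyRecB rest' rest' 0 :=
          anyRecB_shift_two d rest' rest' 0 (by simp)
        have hb1 : bsRun ('\\' :: d :: rest') 1 0 = 1 := by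
          rw [bsRun_eq]; simp [bsSpec]
        simp only [anyRecB, hb1, h2, ihr]
        simp [stripEsc, isMarker]
    · have ihr := anyRecB_eq rest
      have h1 : anyRecB (c :: rest) rest 1 = anyRecB rest rest 0 :=
        anyRecB_shift_one c rest rest 0 (by omega) hc
      have hb0 : bsRun (c :: rest) 0 0 = 0 := by rw [bsRun_eq]; simp [bsSpec]
      simp only [anyRecB, hb0, h1, ihr]
      rw [stripEsc_cons c rest hc]
      simp
termination_by cs.length
decreasing_by all_goals simp <;> omega

theorem loop_eq (patterns : List String) (i : Int) : loopA patterns i = loopB patterns i := by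
  induction patterns generalizing i with
  | nil => rfl
  | cons p rest ih =>
    simp only [loopA, loopB, anyRecB_eq, whileA_eq, List.drop_zero]
    by_cases hp : p = ""
    · subst hp; simp [stripEsc, ih]
    · have hp' : (p == "") = false := by simpa using hp
      by_cases hm : ((stripEsc p.toList).any isMarker) = true <;> simp [hp', hm, ih]

-- ===== VERDICT (by name: the statement is the Claim_ definition above) =====
theorem validate_patterns_spec : Claim_equal_validate_patterns := by
  intro patterns _
  unfold Spec_validate_patterns validate_patterns validate_patterns_alt
  exact loop_eq patterns 1
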